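-- pv_equiv track=rewrite | github.com/ReedBTC/localbitcoiners | bots/boost-leaders/local_bitcoiners_boostleaders.py | format_note
-- ===== SOURCE A (Python) =====
-- TOP_TIERS       = 3
--
-- EXCLUDED_NPUBS = {
--     "npub1xgyjasdztryl9sg6nfdm2wcj0j3qjs03sq7a0an32pg0lr5l6yaqxhgu7s",  # reed
--     "npub1f5pre6wl6ad87vr4hr5wppqq30sh58m4p33mthnjreh03qadcajs7gwt3z",  # rev
-- }
--
-- def format_booster_display(key):
--     """Display string for a boost-leaders booster key. Keys are either
--     npubs (most common — npub-attributed boosts) or `name:<senderName>` for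
--     keysend named-anon boosts (PodcastGuru-style boostagrams that carry a
--     senderName but no senderPubkey). Truly anonymous boosts never make it
--     into `boosters` so don't need a display path here."""
--     if key.startswith("name:"):
--         return key[5:]
--     return f"nostr:{key}"
--
-- def format_note(boosters):
--     medals   = ["🥇", "🥈", "🥉"]
--     filtered = {k: v for k, v in boosters.items() if k not in EXCLUDED_NPUBS}
--     ranked   = sorted(filtered.items(), key=lambda x: -len(x[1]))
--
--     # Find the top TOP_TIERS distinct episode-counts, then include every
--     # booster whose count is in one of those tiers — a 10-way tie for 3rd
--     # all gets listed.
--     distinct_counts = []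
--     for _, episodes in ranked:
--         c = len(episodes)
--         if c not in distinct_counts:
--             distinct_counts.append(c)
--         if len(distinct_counts) >= TOP_TIERS:
--             break
--     top_counts = set(distinct_counts)
--     top        = [(k, eps) for k, eps in ranked if len(eps) in top_counts]
--     tier_medal = {c: medals[i] for i, c in enumerate(distinct_counts)}
--
--     lines = ["⚡ Local Bitcoiners Boost Leaders", ""]
--     lines.append("Listeners who have boosted the most episodes, all-time:")
--     lines.append("")
--
--     for booster_key, episodes in top:
--         count = len(episodes)
--         medal = tier_medal.get(count, "▪️")
--         display = format_booster_display(booster_key)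
--         lines.append(f"{medal} {display} - {count} episode{'s' if count != 1 else ''}")
--
--     lines.append("")
--     lines.append("#LocalBitcoiners #V4V #valuechain")
--     lines.append("")
--     lines.append("🎧 https://fountain.fm/show/Q48WBr6nT3mrbwMZ8ydY")
--     return "\n".join(lines)
-- ===== SOURCE B (Python) =====
-- TOP_TIERS       = 3
--
-- EXCLUDED_NPUBS = {
--     "npub1xgyjasdztryl9sg6nfdm2wcj0j3qjs03sq7a0an32pg0lr5l6yaqxhgu7s",  # reed
--     "npub1f5pre6wl6ad87vr4hr5wppqq30sh58m4p33mthnjreh03qadcajs7gwt3z",  # rev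
-- }
--
-- def format_note(boosters):
--     medals = ["🥇", "🥈", "🥉"]
--     # Bucket the (non-excluded) boosters by episode-count, in dict order.
--     groups = {}
--     for k, v in boosters.items():
--         if k in EXCLUDED_NPUBS:
--             continue
--         groups.setdefault(len(v), []).append(k)
--     # The top tiers are simply the largest distinct counts.
--     top_counts = sorted(groups, reverse=True)[:TOP_TIERS]
--
--     lines = ["⚡ Local Bitcoiners Boost Leaders", ""]
--     lines.append("Listeners who have boosted the most episodes, all-time:")
--     lines.append("")
--     for i, c in enumerate(top_counts):
--         for key in groups[c]:
--             display = key[5:] if key.startswith("name:") else f"nostr:{key}"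
--             lines.append(f"{medals[i]} {display} - {c} episode{'s' if c != 1 else ''}")
--     lines.append("")
--     lines.append("#LocalBitcoiners #V4V #valuechain")
--     lines.append("")
--     lines.append("🎧 https://fountain.fm/show/Q48WBr6nT3mrbwMZ8ydY")
--     return "\n".join(lines)
-- ===== Notes on version B (the rewrite author's own statement) =====
-- stated objective: alternative
-- what changed: B replaces A's full stable sort of all boosters plus the ranked rescan with a one-pass count->boosters bucket dict (insertion order preserves ties) and a sort of only the distinct counts, walking the top three counts in descending order.
import Mathlib
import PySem

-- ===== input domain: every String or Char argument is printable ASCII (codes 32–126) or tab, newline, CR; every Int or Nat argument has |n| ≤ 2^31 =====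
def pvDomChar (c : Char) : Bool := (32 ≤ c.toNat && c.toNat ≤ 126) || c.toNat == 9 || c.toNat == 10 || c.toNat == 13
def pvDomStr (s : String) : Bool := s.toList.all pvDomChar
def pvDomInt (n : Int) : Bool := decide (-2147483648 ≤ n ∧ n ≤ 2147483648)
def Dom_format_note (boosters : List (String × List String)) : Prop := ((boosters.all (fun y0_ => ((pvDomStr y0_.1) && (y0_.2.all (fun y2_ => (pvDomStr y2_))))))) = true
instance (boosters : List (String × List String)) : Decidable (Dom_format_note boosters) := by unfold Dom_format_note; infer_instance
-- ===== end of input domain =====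

-- B replaces A's full stable sort of the boosters with a count→boosters bucket table built in one
-- pass plus a sort of the distinct counts only (objective: alternative decomposition, same result).
-- Both Pythons take a dict; per the type convention the List argument is read through
-- PySem.Dict.ofList (last value wins, first position kept), in both ports alike.

-- ===== PORT A =====
def pvMedals : List String := ["🥇", "🥈", "🥉"]

def pvExcluded : PySem.Set String :=
  PySem.Set.ofList
    ["npub1xgyjasdztryl9sg6nfdm2wcj0j3qjs03sq7a0an32pg0lr5l6yaqxhgu7s",
     "npub1f5pre6wl6ad87vr4hr5wppqq30sh58m4p33mthnjreh03qadcajs7gwt3z"]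

def format_booster_display (key : String) : String :=
  if PySem.Str.startswith key "name:" = true then PySem.Str.slice key (some 5) none
  else "nostr:" ++ key

-- A's 'for _, episodes in ranked: … break' loop collecting the first TOP_TIERS distinct counts
def pvDistinctLoop : List (String × List String) → List Int → List Int
  | [], acc => acc
  | p :: rest, acc =>
    let c : Int := p.2.length
    let acc' := if acc.contains c then acc else acc ++ [c]
    if 3 ≤ acc'.length then acc' else pvDistinctLoop rest acc'

def format_note (boosters : List (String × List String)) : String :=
  let medals : List String := pvMedals
  let filtered : PySem.Dict String (List String) :=   -- {k: v for k, v in boosters.items() if k not in EXCLUDED_NPUBS}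
    (PySem.Dict.ofList boosters).items.foldl
      (fun d p => if !(pvExcluded.contains p.1) then d.insert p.1 p.2 else d) PySem.Dict.empty
  let ranked := PySem.List.sorted filtered.items (fun x => -(x.2.length : Int))
  let distinct_counts := pvDistinctLoop ranked []
  let top_counts : PySem.Set Int := PySem.Set.ofList distinct_counts
  let top := ranked.filter (fun p => top_counts.contains ((p.2.length : Int)))
  -- medals[i] is always in range (i < 3); pyGetD's default is never used
  let tier_medal : PySem.Dict Int String :=
    (PySem.List.enumerate distinct_counts).foldl
      (fun d ic => d.insert ic.2 (PySem.List.pyGetD medals ic.1 "")) PySem.Dict.empty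
  let lines := ["⚡ Local Bitcoiners Boost Leaders", ""]
    ++ ["Listeners who have boosted the most episodes, all-time:"] ++ [""]
  let lines := top.foldl (fun ls p =>
      let count : Int := p.2.length
      let medal := tier_medal.getD count "▪️"
      let display := format_booster_display p.1
      ls ++ [medal ++ " " ++ display ++ " - " ++ PySem.Int.toStr count ++ " episode"
              ++ (if count ≠ 1 then "s" else "")]) lines
  let lines := lines ++ [""] ++ ["#LocalBitcoiners #V4V #valuechain"] ++ [""]
    ++ ["🎧 https://fountain.fm/show/Q48WBr6nT3mrbwMZ8ydY"]
  PySem.Str.join "\n" lines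

-- ===== PORT B =====
def format_note_alt (boosters : List (String × List String)) : String :=
  let medals : List String := pvMedals
  let groups : PySem.Dict Int (List String) :=   -- groups.setdefault(len(v), []).append(k)
    (PySem.Dict.ofList boosters).items.foldl
      (fun d p => if pvExcluded.contains p.1 then d
                  else d.modify (p.2.length : Int) [] (fun l => l ++ [p.1])) PySem.Dict.empty
  let top_counts := PySem.List.slice (PySem.List.sorted groups.keys (fun c => c) true) none (some 3)
  let lines := ["⚡ Local Bitcoiners Boost Leaders", ""]
    ++ ["Listeners who have boosted the most episodes, all-time:"] ++ [""]
  -- groups[c]: c is always a key of groups, so getD's default is never used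
  let lines := (PySem.List.enumerate top_counts).foldl (fun ls ic =>
      (groups.getD ic.2 []).foldl (fun ls key =>
        let display := if PySem.Str.startswith key "name:" = true
                       then PySem.Str.slice key (some 5) none else "nostr:" ++ key
        ls ++ [PySem.List.pyGetD medals ic.1 "" ++ " " ++ display ++ " - "
                ++ PySem.Int.toStr ic.2 ++ " episode" ++ (if ic.2 ≠ 1 then "s" else "")]) ls) lines
  let lines := lines ++ [""] ++ ["#LocalBitcoiners #V4V #valuechain"] ++ [""]
    ++ ["🎧 https://fountain.fm/show/Q48WBr6nT3mrbwMZ8ydY"]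
  PySem.Str.join "\n" lines

-- ===== PRECONDITION & SPEC =====
def Spec_format_note (boosters : List (String × List String)) (out : String) : Prop := out = format_note_alt boosters
instance (boosters : List (String × List String)) (out : String) : Decidable (Spec_format_note boosters out) := by unfold Spec_format_note; infer_instance

-- ===== CLAIM (what is proved, stated in full; the proofs are below) =====
def Claim_equal_format_note : Prop := ∀ (boosters : List (String × List String)), Dom_format_note boosters → Spec_format_note boosters (format_note boosters)

-- ===== LEMMAS AND PROOFS =====

-- appending one element per iteration is mapping
theorem pv_foldl_append_map {α β : Type} (l : List α) (f : α → β) (init : List β) :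
    l.foldl (fun a x => a ++ [f x]) init = init ++ l.map f := by
  induction l generalizing init with
  | nil => simp
  | cons x t ih => simp [List.foldl_cons, ih]

-- insertBy lands exactly between the "not-before" prefix and the "before" suffix
theorem pv_insertBy_append {α : Type} (before : α → α → Bool) (x : α) (L₁ L₂ : List α)
    (h₁ : ∀ y ∈ L₁, before x y = false) (h₂ : ∀ y ∈ L₂, before x y = true) :
    PySem.List.insertBy before x (L₁ ++ L₂) = L₁ ++ x :: L₂ := by
  induction L₁ with
  | nil =>
    cases L₂ with
    | nil => simp [PySem.List.insertBy]
    | cons y t => simp [PySem.List.insertBy, h₂ y (by simp)]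
  | cons y t ih =>
    have hy : before x y = false := h₁ y (by simp)
    simp only [List.cons_append, PySem.List.insertBy, hy]
    simp [ih (fun z hz => h₁ z (by simp [hz]))]

-- a strictly increasing list splits at a pivot into its ≤ and its > part
theorem pv_pairwise_filter_split (K : List Int) (c : Int) (hK : K.Pairwise (· < ·)) :
    K = K.filter (fun k => decide (k ≤ c)) ++ K.filter (fun k => decide (c < k)) := by
  induction K with
  | nil => simp
  | cons k t ih =>
    rcases List.pairwise_cons.mp hK with ⟨hk, ht⟩
    by_cases hkc : k ≤ c
    · simpa [List.filter_cons, hkc, not_lt.mpr hkc] using congrArg (k :: ·) (ih ht)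
    · push_neg at hkc
      have h1 : t.filter (fun k => decide (k ≤ c)) = [] := by
        rw [List.filter_eq_nil_iff]
        intro a ha
        simp only [decide_eq_true_eq]
        exact not_le.mpr (lt_trans hkc (hk a ha))
      have h2 : t.filter (fun k => decide (c < k)) = t := by
        rw [List.filter_eq_self]
        intro a ha
        simp only [decide_eq_true_eq]
        exact lt_trans hkc (hk a ha)
      have h1' : (k :: t).filter (fun k => decide (k ≤ c)) = [] := by
        simp [not_le.mpr hkc, h1]
      simp [h1', hkc, h2]

theorem pv_flatMap_congr {α β : Type} (K : List α) (f g : α → List β)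
    (h : ∀ k ∈ K, f k = g k) : K.flatMap f = K.flatMap g := by
  induction K with
  | nil => rfl
  | cons k t ih =>
    simp only [List.flatMap_cons, h k (by simp), ih (fun a ha => h a (by simp [ha]))]

-- THE BUCKET LEMMA: a stable sort is the concatenation, over the sorted distinct key
-- values, of the equal-key sublists in original order.
theorem pv_sorted_eq_flatMap_buckets {α : Type} (xs : List α) (g : α → Int) :
    PySem.List.sorted xs g
      = (PySem.List.sorted (PySem.Set.ofList (xs.map g)) (fun k => k)).flatMap
          (fun k => xs.filter (fun x => g x == k)) := by
  induction xs using List.reverseRecOn with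
  | nil => rfl
  | append_singleton ys x ih =>
    have hsortstep : PySem.List.sorted (ys ++ [x]) g
        = PySem.List.insertBy (fun a b => decide (g a < g b)) x (PySem.List.sorted ys g) := by
      rw [PySem.List.sorted_eq_foldl_insertBy (ys ++ [x]) g, List.foldl_append]
      simp only [List.foldl_cons, List.foldl_nil]
      rw [← PySem.List.sorted_eq_foldl_insertBy]
    have hS : PySem.Set.ofList ((ys ++ [x]).map g) = PySem.Set.add (PySem.Set.ofList (ys.map g)) (g x) := by
      rw [List.map_append, PySem.Set.ofList_eq_foldl, List.foldl_append, ← PySem.Set.ofList_eq_foldl]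
      rfl
    set S := PySem.Set.ofList (ys.map g) with hSdef
    set K := PySem.List.sorted S (fun k => k) with hKdef
    set bkt : Int → List α := fun k => ys.filter (fun z => g z == k) with hbkt
    have hKpw : K.Pairwise (· < ·) := PySem.List.sorted_ofList_pairwise_lt (ys.map g)
    set A := K.filter (fun k => decide (k ≤ g x)) with hA
    set B := K.filter (fun k => decide (g x < k)) with hB
    have hsplit : K = A ++ B := pv_pairwise_filter_split K (g x) hKpw
    have hmemA : ∀ k ∈ A, k ≤ g x := by
      intro k hk
      have := (List.mem_filter.mp hk).2
      simpa using this
    have hmemB : ∀ k ∈ B, g x < k := by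
      intro k hk
      have := (List.mem_filter.mp hk).2
      simpa using this
    have hApw : A.Pairwise (· < ·) := List.Pairwise.sublist List.filter_sublist hKpw
    have hBpw : B.Pairwise (· < ·) := List.Pairwise.sublist List.filter_sublist hKpw
    have hbmem : ∀ k, ∀ y ∈ bkt k, g y = k := by
      intro k y hy
      have := (List.mem_filter.mp hy).2
      simpa using this
    have hLHS : PySem.List.sorted (ys ++ [x]) g = A.flatMap bkt ++ x :: B.flatMap bkt := by
      rw [hsortstep, ih, hsplit, List.flatMap_append]
      apply pv_insertBy_append
      · intro y hy
        rcases List.mem_flatMap.mp hy with ⟨k, hkA, hyk⟩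
        have h1 : g y = k := hbmem k y hyk
        have h2 := hmemA k hkA
        simp only [decide_eq_false_iff_not, not_lt]
        omega
      · intro y hy
        rcases List.mem_flatMap.mp hy with ⟨k, hkB, hyk⟩
        have h1 : g y = k := hbmem k y hyk
        have h2 := hmemB k hkB
        simp only [decide_eq_true_eq]
        omega
    have hbkt' : ∀ k, (ys ++ [x]).filter (fun z => g z == k) = bkt k ++ if g x = k then [x] else [] := by
      intro k
      rw [List.filter_append]
      congr 1
      by_cases h : g x = k <;> simp [h]
    rw [hLHS, hS]
    by_cases hmem : g x ∈ S
    · -- the key g x already occurs: the key list is unchanged, x joins the end of its bucket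
      have hadd : PySem.Set.add S (g x) = S := by
        rw [PySem.Set.add, if_pos ((PySem.Set.contains_iff S (g x)).mpr hmem)]
      have hgxK : g x ∈ K := (PySem.List.mem_sorted S (fun k => k) false (g x)).mpr hmem
      have hgxA : g x ∈ A := List.mem_filter.mpr ⟨hgxK, by simp⟩
      rcases List.eq_nil_or_concat A with hAnil | ⟨A₀, a, hA0⟩
      · rw [hAnil] at hgxA; simp at hgxA
      · rw [List.concat_eq_append] at hA0
        have ha : a = g x := by
          rw [hA0] at hgxA
          rcases List.mem_append.mp hgxA with h0 | h0
          · have h1 : g x < a := by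
              have hpw := hApw
              rw [hA0] at hpw
              exact (List.pairwise_append.mp hpw).2.2 (g x) h0 a (by simp)
            have h2 : a ≤ g x := hmemA a (by rw [hA0]; simp)
            omega
          · exact (List.mem_singleton.mp h0).symm
        have hA0lt : ∀ k ∈ A₀, k < g x := by
          intro k hk
          have hpw := hApw
          rw [hA0, ha] at hpw
          exact (List.pairwise_append.mp hpw).2.2 k hk (g x) (by simp)
        have e1 : A₀.flatMap (fun k => bkt k ++ if g x = k then [x] else []) = A₀.flatMap bkt :=
          pv_flatMap_congr _ _ _
            (fun k hk => by rw [if_neg (by have := hA0lt k hk; omega), List.append_nil])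
        have e2 : B.flatMap (fun k => bkt k ++ if g x = k then [x] else []) = B.flatMap bkt :=
          pv_flatMap_congr _ _ _
            (fun k hk => by rw [if_neg (by have := hmemB k hk; omega), List.append_nil])
        have hcongK : ∀ k ∈ K, List.filter (fun z => g z == k) (ys ++ [x])
            = bkt k ++ if g x = k then [x] else [] := fun k _ => hbkt' k
        have e4 : K.flatMap (fun k => List.filter (fun z => g z == k) (ys ++ [x]))
            = (A₀.flatMap bkt ++ (bkt (g x) ++ [x])) ++ B.flatMap bkt := by
          rw [pv_flatMap_congr _ _ _ hcongK, hsplit, hA0, List.flatMap_append,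
            List.flatMap_append, e1, e2]
          simp [ha]
        rw [hadd, ← hKdef, e4, hA0, List.flatMap_append, ha]
        simp
    · -- a new key: g x is spliced between the ≤ keys and the > keys, with bucket [x]
      have hadd : PySem.Set.add S (g x) = S ++ [g x] := by
        rw [PySem.Set.add, if_neg (fun h => hmem ((PySem.Set.contains_iff S (g x)).mp h))]
      have hgxnK : g x ∉ K := fun h => hmem ((PySem.List.mem_sorted S (fun k => k) false (g x)).mp h)
      have hKperm : K.Perm S := PySem.List.sorted_perm S (fun k => k) false
      have hAltgx : ∀ k ∈ A, k < g x := by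
        intro k hk
        have h1 := hmemA k hk
        have h2 : k ≠ g x := fun h => hgxnK (h ▸ (List.mem_filter.mp hk).1)
        omega
      have hK' : PySem.List.sorted (S ++ [g x]) (fun k => k) = A ++ g x :: B := by
        apply PySem.List.sorted_eq_of_perm_of_pairwise_lt
        · have p1 : (A ++ g x :: B).Perm (g x :: (A ++ B)) := List.perm_middle
          have p2 : (A ++ B).Perm S := hsplit ▸ hKperm
          exact p1.trans ((p2.cons (g x)).trans (List.perm_append_singleton (g x) S).symm)
        · rw [List.pairwise_append]
          refine ⟨hApw, ?_, ?_⟩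
          · rw [List.pairwise_cons]
            exact ⟨fun b hb => hmemB b hb, hBpw⟩
          · intro a ha b hb
            rcases List.mem_cons.mp hb with rfl | hb'
            · exact hAltgx a ha
            · exact lt_trans (hAltgx a ha) (hmemB b hb')
      have hbgx : bkt (g x) = [] := by
        rw [hbkt]
        rw [List.filter_eq_nil_iff]
        intro y hy hgy
        apply hmem
        rw [hSdef, PySem.Set.mem_ofList]
        exact List.mem_map.mpr ⟨y, hy, by simpa using hgy⟩
      have e1 : A.flatMap (fun k => bkt k ++ if g x = k then [x] else []) = A.flatMap bkt :=
        pv_flatMap_congr _ _ _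
          (fun k hk => by rw [if_neg (by have := hAltgx k hk; omega), List.append_nil])
      have e2 : B.flatMap (fun k => bkt k ++ if g x = k then [x] else []) = B.flatMap bkt :=
        pv_flatMap_congr _ _ _
          (fun k hk => by rw [if_neg (by have := hmemB k hk; omega), List.append_nil])
      have hcong : ∀ k ∈ (A ++ g x :: B), List.filter (fun z => g z == k) (ys ++ [x])
          = bkt k ++ if g x = k then [x] else [] := fun k _ => hbkt' k
      have e4 : (A ++ g x :: B).flatMap (fun k => List.filter (fun z => g z == k) (ys ++ [x]))
          = A.flatMap bkt ++ x :: B.flatMap bkt := by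
        rw [pv_flatMap_congr _ _ _ hcong, List.flatMap_append, List.flatMap_cons, e1, e2]
        simp [hbgx]
      rw [hadd, hK', e4]

-- ofList commutes with mapping by negation
theorem pv_add_map_neg (s : List Int) (x : Int) :
    PySem.Set.add (s.map (fun c => -c)) (-x) = (PySem.Set.add s x).map (fun c => -c) := by
  by_cases hx : x ∈ s
  · have hx2 : -x ∈ s.map (fun c => -c) := List.mem_map.mpr ⟨x, hx, rfl⟩
    simp [PySem.Set.add, PySem.Set.contains, hx, hx2]
  · have hx2 : -x ∉ s.map (fun c => -c) := by
      intro h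
      rcases List.mem_map.mp h with ⟨y, hy, hyx⟩
      have : y = x := by omega
      exact hx (this ▸ hy)
    simp [PySem.Set.add, PySem.Set.contains, hx, hx2]

theorem pv_foldl_add_map_neg (l : List Int) (s : List Int) :
    (l.map (fun c => -c)).foldl PySem.Set.add (s.map (fun c => -c))
      = (l.foldl PySem.Set.add s).map (fun c => -c) := by
  induction l generalizing s with
  | nil => rfl
  | cons x t ih => simp only [List.map_cons, List.foldl_cons, pv_add_map_neg, ih]

theorem pv_ofList_map_neg (l : List Int) :
    PySem.Set.ofList (l.map (fun c => -c)) = (PySem.Set.ofList l).map (fun c => -c) := by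
  have := pv_foldl_add_map_neg l []
  simpa [PySem.Set.ofList_eq_foldl] using this

-- ascending sort of the negations = negation of the descending sort (on a nodup list)
theorem pv_sorted_neg (S : List Int) (hnd : S.Nodup) :
    PySem.List.sorted (S.map (fun c => -c)) (fun k => k)
      = (PySem.List.sorted S (fun k => k) true).map (fun c => -c) := by
  apply PySem.List.sorted_eq_of_perm_of_pairwise_lt
  · exact (PySem.List.sorted_perm S (fun k => k) true).map (fun c => -c)
  · have hpw := PySem.List.sorted_pairwise_rev S (fun k => k)
    have hnd' : (PySem.List.sorted S (fun k => k) true).Nodup :=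
      (PySem.List.sorted_perm S (fun k => k) true).nodup_iff.mpr hnd
    have hlt : (PySem.List.sorted S (fun k => k) true).Pairwise (fun a b => b < a) := by
      have := hpw.and hnd'
      exact this.imp (fun h => lt_of_le_of_ne h.1 (Ne.symm h.2))
    rw [List.pairwise_map]
    exact hlt.imp (fun h => by omega)

theorem pv_distinctLoop_skip (ps rest : List (String × List String)) (acc : List Int)
    (h : ∀ p ∈ ps, acc.contains ((p.2.length : Int)) = true) (hlen : acc.length < 3) :
    pvDistinctLoop (ps ++ rest) acc = pvDistinctLoop rest acc := by
  induction ps with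
  | nil => rfl
  | cons p t ih =>
    have hp := h p (by simp)
    simp only [List.cons_append, pvDistinctLoop, hp, if_true]
    rw [if_neg (by omega)]
    exact ih (fun q hq => h q (by simp [hq]))

theorem pv_distinctLoop_general (Kd : List Int) (bkt : Int → List (String × List String))
    (acc : List Int) (hacc : acc.length < 3) (hnd : Kd.Nodup)
    (hdis : ∀ c ∈ Kd, acc.contains c = false)
    (hb : ∀ c ∈ Kd, bkt c ≠ [] ∧ ∀ p ∈ bkt c, (p.2.length : Int) = c) :
    pvDistinctLoop (Kd.flatMap bkt) acc = acc ++ Kd.take (3 - acc.length) := by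
  induction Kd generalizing acc with
  | nil => simp [pvDistinctLoop]
  | cons c t ih =>
    rcases hb c (by simp) with ⟨hne, hcnt⟩
    rcases List.exists_cons_of_ne_nil hne with ⟨p, ps, hbc⟩
    have hpc : (p.2.length : Int) = c := hcnt p (by simp [hbc])
    have hcacc : acc.contains c = false := hdis c (by simp)
    simp only [List.flatMap_cons, hbc, List.cons_append, pvDistinctLoop, hpc, hcacc,
      Bool.false_eq_true, if_false]
    by_cases h3 : 3 ≤ (acc ++ [c]).length
    · rw [if_pos h3]
      have hl2 : acc.length = 2 := by simp at h3; omega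
      have h1 : 3 - acc.length = 1 := by omega
      simp [h1]
    · rw [if_neg h3]
      have hmemacc : ∀ q ∈ ps, (acc ++ [c]).contains ((q.2.length : Int)) = true := by
        intro q hq
        have : (q.2.length : Int) = c := hcnt q (by simp [hbc, hq])
        simp [this]
      have hlen' : (acc ++ [c]).length < 3 := by simp at h3 ⊢; omega
      rw [pv_distinctLoop_skip ps _ _ hmemacc hlen']
      have hndt : t.Nodup := (List.nodup_cons.mp hnd).2
      have hcnott : c ∉ t := (List.nodup_cons.mp hnd).1
      have hdis' : ∀ c' ∈ t, (acc ++ [c]).contains c' = false := by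
        intro c' hc'
        have h1 : acc.contains c' = false := hdis c' (by simp [hc'])
        have h2 : c' ≠ c := fun h => hcnott (h ▸ hc')
        simp at h1 ⊢
        exact ⟨h1, h2⟩
      rw [ih (acc ++ [c]) hlen' hndt hdis' (fun c' hc' => hb c' (by simp [hc']))]
      have h1 : 3 - acc.length = (3 - (acc ++ [c]).length) + 1 := by simp; omega
      rw [h1, List.take_succ_cons]
      simp

-- A's distinct-counts loop over a bucket concatenation returns the first 3 counts
theorem pv_distinctLoop_flatMap (Kd : List Int) (bkt : Int → List (String × List String))
    (hnd : Kd.Nodup)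
    (hb : ∀ c ∈ Kd, bkt c ≠ [] ∧ ∀ p ∈ bkt c, (p.2.length : Int) = c) :
    pvDistinctLoop (Kd.flatMap bkt) [] = Kd.take 3 := by
  simpa using pv_distinctLoop_general Kd bkt [] (by simp) hnd (by simp) hb

theorem pv_getD_tierfold_notmem (L : List (Int × Int)) (f : Int → String)
    (c : Int) (d : PySem.Dict Int String) (dflt : String) (h : ∀ q ∈ L, q.2 ≠ c) :
    (L.foldl (fun d ic => d.insert ic.2 (f ic.1)) d).getD c dflt = d.getD c dflt := by
  induction L generalizing d with
  | nil => rfl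
  | cons q t ih =>
    simp only [List.foldl_cons]
    rw [ih (d.insert q.2 (f q.1)) (fun r hr => h r (List.mem_cons_of_mem _ hr))]
    exact PySem.Dict.getD_insert_of_ne d (f q.1) dflt (fun hc => (h q (by simp)) hc.symm)

-- lookup in a dict built by inserting distinct keys
theorem pv_getD_tierfold (L : List (Int × Int)) (f : Int → String)
    (hnd : (L.map (·.2)).Nodup) (i c : Int) (h : (i, c) ∈ L) (d : PySem.Dict Int String) (dflt : String) :
    (L.foldl (fun d ic => d.insert ic.2 (f ic.1)) d).getD c dflt = f i := by
  induction L generalizing d with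
  | nil => simp at h
  | cons q t ih =>
    have hnd' : (t.map (·.2)).Nodup := (List.nodup_cons.mp hnd).2
    by_cases hq : q = (i, c)
    · subst hq
      have hnc : ∀ r ∈ t, r.2 ≠ c := by
        intro r hr hrc
        exact (List.nodup_cons.mp hnd).1 (hrc ▸ List.mem_map.mpr ⟨r, hr, rfl⟩)
      simp only [List.foldl_cons]
      rw [pv_getD_tierfold_notmem t f c _ dflt hnc, PySem.Dict.getD_insert_self]
    · have hmem : (i, c) ∈ t := by
        rcases List.mem_cons.mp h with h' | h'
        · exact absurd h'.symm hq
        · exact h'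
      exact ih hnd' hmem _

theorem pv_enumerate_map_snd {α : Type} (T : List α) (s : Int) :
    (PySem.List.enumerate T s).map (·.2) = T := by
  induction T generalizing s with
  | nil => rfl
  | cons x t ih => simp [PySem.List.enumerate, ih]

theorem pv_flatMap_enumerate {α β : Type} (T : List α) (s : Int) (F : α → List β) :
    (PySem.List.enumerate T s).flatMap (fun ic => F ic.2) = T.flatMap F := by
  have := List.flatMap_map (fun ic : Int × α => ic.2) F (PySem.List.enumerate T s)
  rw [← this, pv_enumerate_map_snd]

-- ===== VERDICT (by name: the statement is the Claim_ definition above) =====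
theorem pv_beq_neg (a c : Int) : ((-a : Int) == -c) = (a == c) := by
  by_cases h : a = c
  · simp [h]
  · have h2 : ¬(-a = -c) := fun hh => h (by omega)
    simp [h, h2]

-- the whole pipeline agrees once both sides run over the same filtered booster list F
set_option maxHeartbeats 1600000 in
theorem pv_main (F : List (String × List String)) :
    PySem.Str.join "\n"
      (List.foldl
          (fun ls p =>
            ls ++
              [((PySem.List.enumerate
                      (pvDistinctLoop (PySem.List.sorted F fun x => -(x.2.length : Int)) [])).foldl
                    (fun d ic => d.insert ic.2 (PySem.List.pyGetD pvMedals ic.1 "")) PySem.Dict.empty).getD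
                  (p.2.length : Int) "▪️" ++ " " ++ format_booster_display p.1 ++ " - " ++
                PySem.Int.toStr (p.2.length : Int) ++ " episode" ++
                if (p.2.length : Int) ≠ 1 then "s" else ""])
          (["⚡ Local Bitcoiners Boost Leaders", ""] ++
              ["Listeners who have boosted the most episodes, all-time:"] ++ [""])
          (List.filter
            (fun p =>
              (PySem.Set.ofList
                    (pvDistinctLoop (PySem.List.sorted F fun x => -(x.2.length : Int)) [])).contains
                (p.2.length : Int))
            (PySem.List.sorted F fun x => -(x.2.length : Int))) ++
        [""] ++ ["#LocalBitcoiners #V4V #valuechain"] ++ [""] ++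
        ["🎧 https://fountain.fm/show/Q48WBr6nT3mrbwMZ8ydY"])
  = PySem.Str.join "\n"
      (List.foldl
          (fun ls ic =>
            List.foldl
              (fun ls key =>
                ls ++
                  [PySem.List.pyGetD pvMedals ic.1 "" ++ " " ++
                      (if PySem.Str.startswith key "name:" = true then PySem.Str.slice key (some 5) none
                       else "nostr:" ++ key) ++ " - " ++ PySem.Int.toStr ic.2 ++ " episode" ++
                    if ic.2 ≠ 1 then "s" else ""])
              ls
              ((F.foldl (fun d p => d.modify (p.2.length : Int) [] fun l => l ++ [p.1])
                  PySem.Dict.empty).getD ic.2 []))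
          (["⚡ Local Bitcoiners Boost Leaders", ""] ++
              ["Listeners who have boosted the most episodes, all-time:"] ++ [""])
          (PySem.List.enumerate
            (PySem.List.slice
              (PySem.List.sorted
                (F.foldl (fun d p => d.modify (p.2.length : Int) [] fun l => l ++ [p.1])
                    PySem.Dict.empty).keys (fun c => c) true)
              none (some 3))) ++
        [""] ++ ["#LocalBitcoiners #V4V #valuechain"] ++ [""] ++
        ["🎧 https://fountain.fm/show/Q48WBr6nT3mrbwMZ8ydY"]) := by
  set S := PySem.Set.ofList (F.map (fun p => (p.2.length : Int))) with hS
  set Kd := PySem.List.sorted S (fun c => c) true with hKd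
  set T := Kd.take 3 with hT
  set bktc : Int → List (String × List String) :=
    fun c => F.filter (fun p => (p.2.length : Int) == c) with hbktc
  have hKdnd : Kd.Nodup :=
    (PySem.List.sorted_perm S (fun c => c) true).nodup_iff.mpr (PySem.Set.nodup_ofList _)
  have hTnd : T.Nodup := List.Nodup.sublist (List.take_sublist 3 Kd) hKdnd
  have hranked : (PySem.List.sorted F fun x => -(x.2.length : Int)) = Kd.flatMap bktc := by
    rw [pv_sorted_eq_flatMap_buckets F (fun x => -(x.2.length : Int))]
    have h1 : F.map (fun x => -(x.2.length : Int))
        = (F.map (fun p => (p.2.length : Int))).map (fun c => -c) := by rw [List.map_map]; rfl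
    rw [h1, pv_ofList_map_neg, ← hS, pv_sorted_neg S (PySem.Set.nodup_ofList _), ← hKd,
      List.flatMap_map]
    apply pv_flatMap_congr
    intro c _
    apply List.filter_congr
    intro p _
    exact pv_beq_neg _ _
  have hbprop : ∀ c ∈ Kd, bktc c ≠ [] ∧ ∀ p ∈ bktc c, (p.2.length : Int) = c := by
    intro c hc
    constructor
    · have hcS : c ∈ S := (PySem.List.mem_sorted S (fun c => c) true c).mp hc
      rw [hS, PySem.Set.mem_ofList] at hcS
      rcases List.mem_map.mp hcS with ⟨p, hp, hpc⟩
      exact List.ne_nil_of_mem (List.mem_filter.mpr ⟨hp, by simp [hpc]⟩)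
    · intro p hp
      have := (List.mem_filter.mp hp).2
      simpa using this
  have hdist : pvDistinctLoop (PySem.List.sorted F fun x => -(x.2.length : Int)) [] = T := by
    rw [hranked, hT]
    exact pv_distinctLoop_flatMap Kd bktc hKdnd hbprop
  have htop : List.filter
      (fun p => (PySem.Set.ofList T).contains ((p.2.length : Int))) (Kd.flatMap bktc)
      = T.flatMap bktc := by
    rw [List.filter_flatMap]
    have hofT : PySem.Set.ofList T = T := PySem.Set.ofList_eq_self_of_nodup T hTnd
    have hbf : ∀ c ∈ Kd, (bktc c).filter
        (fun p => (PySem.Set.ofList T).contains ((p.2.length : Int)))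
        = if c ∈ T then bktc c else [] := by
      intro c _
      rw [hofT]
      by_cases hcT : c ∈ T
      · rw [if_pos hcT, List.filter_eq_self]
        intro p hp
        have hpc : (p.2.length : Int) = c := by
          have := (List.mem_filter.mp hp).2
          simpa using this
        rw [hpc]
        exact (PySem.Set.contains_iff T c).mpr hcT
      · rw [if_neg hcT, List.filter_eq_nil_iff]
        intro p hp hcon
        have hpc : (p.2.length : Int) = c := by
          have := (List.mem_filter.mp hp).2
          simpa using this
        rw [hpc] at hcon
        exact hcT ((PySem.Set.contains_iff T c).mp hcon)
    rw [pv_flatMap_congr _ _ _ hbf]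
    have hsplitK : Kd = T ++ Kd.drop 3 := (List.take_append_drop 3 Kd).symm
    rw [hsplitK, List.flatMap_append]
    have h2 : (Kd.drop 3).flatMap (fun c => if c ∈ T then bktc c else []) = [] := by
      rw [List.flatMap_eq_nil_iff]
      intro c hc
      exact if_neg (fun hcT => List.disjoint_take_drop hKdnd (le_refl 3) hcT hc)
    have h3 : T.flatMap (fun c => if c ∈ T then bktc c else []) = T.flatMap bktc :=
      pv_flatMap_congr _ _ _ (fun c hc => if_pos hc)
    rw [h2, h3, List.append_nil]
  have hkeysB : (F.foldl (fun d p => d.modify ((p.2.length : Int)) [] fun l => l ++ [p.1])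
      PySem.Dict.empty).keys = S := by
    rw [PySem.Dict.keys_foldl_modify_key F (fun p => ((p.2.length : Int))) []
      (fun _ p => fun l => l ++ [p.1]) PySem.Dict.empty, PySem.Dict.keys_empty,
      PySem.Set.update_nil_left, ← hS]
  have hsliceB : PySem.List.slice Kd none (some 3) = T := by
    rw [PySem.List.slice_to Kd (by norm_num : (0 : Int) ≤ 3)]
    rfl
  have hgetD : ∀ c : Int, (F.foldl (fun d p => d.modify ((p.2.length : Int)) [] fun l => l ++ [p.1])
      PySem.Dict.empty).getD c [] = (bktc c).map (fun p => p.1) := by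
    intro c
    have hfm : F.foldl (fun d p => d.modify ((p.2.length : Int)) [] fun l => l ++ [p.1])
        PySem.Dict.empty
        = (F.map (fun p => (((p.2.length : Int)), p.1))).foldl
            (fun d q => d.modify q.1 [] fun l => l ++ [q.2]) PySem.Dict.empty := by
      rw [List.foldl_map]
    rw [hfm, PySem.Dict.getD_foldl_modify_append, PySem.Dict.getD_empty, List.nil_append,
      List.filter_map, List.map_map, hbktc]
    rfl
  simp only [hdist]
  simp only [hranked, hkeysB]
  simp only [htop]
  simp only [pv_foldl_append_map, hgetD, PySem.List.foldl_append_eq_flatMap]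
  simp only [List.map_flatMap, List.map_map]
  simp only [← hKd, hsliceB]
  rw [← pv_flatMap_enumerate T 0]
  apply congrArg
  congr 1
  congr 1
  congr 1
  congr 1
  congr 1
  apply pv_flatMap_congr
  intro ic hic
  apply List.map_congr_left
  intro p hp
  have hpc : ((p.2.length : Int)) = ic.2 := by
    rw [hbktc] at hp
    have := (List.mem_filter.mp hp).2
    simpa using this
  have htier := pv_getD_tierfold (PySem.List.enumerate T 0)
    (fun i => PySem.List.pyGetD pvMedals i "")
    (by rw [pv_enumerate_map_snd]; exact hTnd) ic.1 ic.2
    (by simpa using hic) PySem.Dict.empty "▪️"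
  simp only [Function.comp, format_booster_display, hpc, htier]

theorem format_note_spec : Claim_equal_format_note := by
  intro boosters _hdom
  show format_note boosters = format_note_alt boosters
  simp only [format_note, format_note_alt]
  set items := (PySem.Dict.ofList boosters).items with hitems
  set F := items.filter (fun p => !pvExcluded.contains p.1) with hF
  have hknd : (items.map (fun p => p.1)).Nodup := by
    have h := PySem.Dict.nodup_keys_ofList boosters
    simpa [PySem.Dict.keys, hitems] using h
  have hsub : (F.map (fun p : String × List String => p.1)).Sublist
      (items.map (fun p => p.1)) := by
    apply List.Sublist.map
    rw [hF]
    exact List.filter_sublist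
  have hnd2 : (F.map (fun p : String × List String => p.1)).Nodup :=
    List.Nodup.sublist hsub hknd
  have hAf : (items.foldl
      (fun d p => if (!pvExcluded.contains p.1) = true then d.insert p.1 p.2 else d)
      PySem.Dict.empty).items = F := by
    rw [PySem.List.foldl_if_eq_foldl_filter (fun p => !pvExcluded.contains p.1)
      (fun d (p : String × List String) => d.insert p.1 p.2) items PySem.Dict.empty, ← hF]
    have h := PySem.Dict.items_foldl_insert_fresh F
      (fun p : String × List String => p.1) (fun p => p.2) PySem.Dict.empty
      (fun a _ => PySem.Dict.contains_empty _) hnd2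
    simpa using h
  have hBf : items.foldl
      (fun d p => if pvExcluded.contains p.1 = true then d
                  else d.modify ((p.2.length : Int)) [] fun l => l ++ [p.1])
      PySem.Dict.empty
      = F.foldl (fun d p => d.modify ((p.2.length : Int)) [] fun l => l ++ [p.1])
          PySem.Dict.empty := by
    have hflip : (fun (d : PySem.Dict Int (List String)) (p : String × List String) =>
        if pvExcluded.contains p.1 = true then d
        else d.modify ((p.2.length : Int)) [] fun l => l ++ [p.1])
        = fun d p => if (!pvExcluded.contains p.1) = true
                     then d.modify ((p.2.length : Int)) [] (fun l => l ++ [p.1]) else d := by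
      funext d p
      cases h : pvExcluded.contains p.1 <;> simp [h]
    rw [hflip, PySem.List.foldl_if_eq_foldl_filter, ← hF]
  rw [hAf, hBf]
  exact pv_main F
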